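-- pv_equiv track=rewrite | github.com/Haaffiiizzz/Leetcode_Problems | TotalWaviness.py | totalWaviness
-- ===== SOURCE A (Python) =====
-- def totalWaviness(num1: int, num2: int) -> int:
--     def waviness_up_to(x: int) -> int:
--         if x <= 0:
--             return 0
--
--         s = str(x)
--         n = len(s)
--
--         from functools import lru_cache
--
--         @lru_cache(None)
--         def dp(pos: int, tight: bool, started: bool, prev1: int, prev2: int):
--             """
--             Returns (count_numbers, total_wavy_positions) for suffix starting at pos.
--             prev2 = digit at pos-2, prev1 = digit at pos-1; 10 denotes "no digit yet".
--             """
--             if pos == n: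
--                 return (1, 0) if started else (0, 0)
--
--             limit = int(s[pos]) if tight else 9
--             total_count = 0
--             total_wavy = 0
--
--             for d in range(0, limit + 1):
--                 next_tight = tight and (d == limit)
--                 if not started:
--                     # Still skipping leading zeros
--                     if d == 0:
--                         cnt, wvy = dp(pos + 1, next_tight, False, 10, 10)
--                         total_count += cnt
--                         total_wavy += wvy
--                         continue
--                     # Starting the number with first non-zero digit
--                     cnt, wvy = dp(pos + 1, next_tight, True, d, 10)
--                     total_count += cnt
--                     total_wavy += wvy
--                     continue
--
--                 # started == True
--                 add = 0
--                 if prev2 != 10: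
--                     if (prev1 > prev2 and prev1 > d) or (prev1 < prev2 and prev1 < d):
--                         add = 1
--
--                 cnt, wvy = dp(pos + 1, next_tight, True, d, prev1)
--                 total_count += cnt
--                 total_wavy += wvy + add * cnt
--
--             return total_count, total_wavy
--
--         return dp(0, True, False, 10, 10)[1]
--
--     return waviness_up_to(num2) - waviness_up_to(num1 - 1)
-- ===== SOURCE B (Python) =====
-- # B: closed-form combinatorial count per decimal boundary (no DP, no memoization).
-- def totalWaviness(num1: int, num2: int) -> int:
--     def wavy(a: int, b: int, c: int) -> int:
--         # position holding b is wavy between neighbours a (left-left sentinel 10 = none) and c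
--         return 1 if a != 10 and ((b > a and b > c) or (b < a and b < c)) else 0
--
--     def w1(p2: int, p1: int) -> int:
--         return sum(wavy(p2, p1, d) for d in range(10))
--
--     def w2(p1: int) -> int:
--         return sum(w1(p1, d) for d in range(10))
--
--     def g(m: int, p1: int, p2: int) -> int:
--         # total wavy positions summed over all 10**m free digit suffixes appended
--         # after a started prefix ending ... p2 p1
--         t = 0
--         if m >= 1:
--             t += w1(p2, p1) * 10 ** (m - 1)
--         if m >= 2:
--             t += w2(p1) * 10 ** (m - 2)
--         if m >= 3:
--             t += (m - 2) * 570 * 10 ** (m - 3)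
--         return t
--
--     def up_to(x: int) -> int:
--         if x <= 0:
--             return 0
--         ds = [ord(c) - 48 for c in str(x)]
--         n = len(ds)
--         total = 0
--         for L in range(1, n):  # numbers with fewer digits than x
--             for a in range(1, 10):
--                 total += g(L - 1, a, 10)
--         p1, p2, wfix = 10, 10, 0
--         for j in range(n):  # n-digit numbers up to x: tight prefix scan
--             for d in range(1 if j == 0 else 0, ds[j]):
--                 total += (wfix + wavy(p2, p1, d)) * 10 ** (n - 1 - j) + g(n - 1 - j, d, p1)
--             wfix += wavy(p2, p1, ds[j])
--             p2, p1 = p1, ds[j]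
--         return total + wfix  # + x itself
--
--     return up_to(num2) - up_to(num1 - 1)
-- ===== Notes on version B (the rewrite author's own statement) =====
-- stated objective: alternative
-- what changed: A's memoized top-down digit DP (lru_cache over (pos, tight, started, prev1, prev2) states) is replaced by a direct combinatorial count: a closed-form formula g(m,p1,p2) for the wavy-position total over all free digit suffixes, summed over shorter lengths and a single tight prefix scan per boundary.
import Mathlib
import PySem

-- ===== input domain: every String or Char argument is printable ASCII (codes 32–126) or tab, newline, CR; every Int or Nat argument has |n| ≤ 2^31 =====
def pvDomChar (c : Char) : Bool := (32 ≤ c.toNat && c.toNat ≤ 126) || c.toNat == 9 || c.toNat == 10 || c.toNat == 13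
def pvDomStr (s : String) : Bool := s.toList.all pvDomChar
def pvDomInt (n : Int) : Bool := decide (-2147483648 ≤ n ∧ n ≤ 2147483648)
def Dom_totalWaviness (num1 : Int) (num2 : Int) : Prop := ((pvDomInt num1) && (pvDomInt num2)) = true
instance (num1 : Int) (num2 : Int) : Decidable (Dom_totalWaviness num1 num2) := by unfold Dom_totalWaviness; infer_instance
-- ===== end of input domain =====

-- B replaces A's memoized digit DP by a direct closed-form combinatorial count per decimal boundary (alternative algorithm, similar cost).

-- ===== PORT A =====
-- int(s[pos]) for the one digit character s[pos] ('0'..'9'): its value (exact there)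
def pvDigitVal (c : Char) : Int := (c.toNat : Int) - 48

-- A's inline 'add' computation (started branch): add = 0; if prev2 != 10: if wavy: add = 1
def pvAdd (prev2 prev1 d : Int) : Int :=
  if prev2 ≠ 10 then
    (if (prev1 > prev2 ∧ prev1 > d) ∨ (prev1 < prev2 ∧ prev1 < d) then 1 else 0)
  else 0

-- the lru_cache of A's dp, keyed like Python by (pos, tight, started, prev1, prev2)
abbrev PvMemo := PySem.Dict (Nat × Bool × Bool × Int × Int) (Int × Int)

mutual
-- dp(pos, tight, started, prev1, prev2) with its cache threaded through; fuel = n - pos makes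
-- the recursion structurally total (guard only; Python reaches pos = n exactly when fuel = 0)
def pvDpA (s : List Char) (n : Nat) (fuel pos : Nat) (tight started : Bool)
    (prev1 prev2 : Int) (memo : PvMemo) : (Int × Int) × PvMemo :=
  match memo.get? (pos, tight, started, prev1, prev2) with
  | some v => (v, memo)
  | none =>
    match fuel with
    | 0 =>
      let r : Int × Int := if started then (1, 0) else (0, 0)
      (r, memo.insert (pos, tight, started, prev1, prev2) r)
    | fuel' + 1 =>
      let limit : Int := if tight then pvDigitVal (PySem.List.pyGetD s (pos : Int) '0') else 9
      let res := pvDpALoop s n fuel' pos tight started prev1 prev2 limit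
        (PySem.List.pyRange 0 (limit + 1) 1) (0, 0) memo
      (res.1, res.2.insert (pos, tight, started, prev1, prev2) res.1)
termination_by (fuel, 1, 0)

-- the 'for d in range(0, limit + 1)' loop of dp, accumulating (total_count, total_wavy)
def pvDpALoop (s : List Char) (n : Nat) (fuel' pos : Nat) (tight started : Bool)
    (prev1 prev2 limit : Int) (ds : List Int) (acc : Int × Int) (memo : PvMemo) :
    (Int × Int) × PvMemo :=
  match ds with
  | [] => (acc, memo)
  | d :: rest =>
    let nextTight := tight && (d == limit)
    if started = false then
      if d = 0 then
        let r := pvDpA s n fuel' (pos + 1) nextTight false 10 10 memo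
        pvDpALoop s n fuel' pos tight started prev1 prev2 limit rest
          (acc.1 + r.1.1, acc.2 + r.1.2) r.2
      else
        let r := pvDpA s n fuel' (pos + 1) nextTight true d 10 memo
        pvDpALoop s n fuel' pos tight started prev1 prev2 limit rest
          (acc.1 + r.1.1, acc.2 + r.1.2) r.2
    else
      let add := pvAdd prev2 prev1 d
      let r := pvDpA s n fuel' (pos + 1) nextTight true d prev1 memo
      pvDpALoop s n fuel' pos tight started prev1 prev2 limit rest
        (acc.1 + r.1.1, acc.2 + r.1.2 + add * r.1.1) r.2
termination_by (fuel' + 1, 0, ds.length)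
end

-- waviness_up_to(x)
def pvUpToA (x : Int) : Int :=
  if x ≤ 0 then 0
  else
    let s := PySem.Int.toChars x
    let n := s.length
    ((pvDpA s n n 0 true false 10 10 PySem.Dict.empty).1).2

def totalWaviness (num1 : Int) (num2 : Int) : Int :=
  pvUpToA num2 - pvUpToA (num1 - 1)

-- ===== PORT B =====
-- wavy(a, b, c): the position holding b is a strict local extremum between a (10 = no digit) and c
def pvWavy (a b c : Int) : Int :=
  if a ≠ 10 ∧ ((b > a ∧ b > c) ∨ (b < a ∧ b < c)) then 1 else 0

-- w1(p2, p1) = sum(wavy(p2, p1, d) for d in range(10))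
def pvW1 (p2 p1 : Int) : Int := ((PySem.List.pyRange 0 10 1).map (fun d => pvWavy p2 p1 d)).sum

-- w2(p1) = sum(w1(p1, d) for d in range(10))
def pvW2 (p1 : Int) : Int := ((PySem.List.pyRange 0 10 1).map (fun d => pvW1 p1 d)).sum

-- g(m, p1, p2): wavy positions summed over all 10^m free suffixes after a prefix ending ... p2 p1
-- (10 ** (m - k) with the exponent nonnegative under its guard: ^ (m - k).toNat is exact there)
def pvG (m p1 p2 : Int) : Int :=
  (if 1 ≤ m then pvW1 p2 p1 * 10 ^ (m - 1).toNat else 0) +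
  (if 2 ≤ m then pvW2 p1 * 10 ^ (m - 2).toNat else 0) +
  (if 3 ≤ m then (m - 2) * 570 * 10 ^ (m - 3).toNat else 0)

-- one step j of B's tight prefix scan, state (total, p1, p2, wfix)
def pvScanStep (n : Int) (ds : List Int) (st : Int × Int × Int × Int) (j : Int) :
    Int × Int × Int × Int :=
  let dj := PySem.List.pyGetD ds j 0
  let lo : Int := if j = 0 then 1 else 0
  let total := (PySem.List.pyRange lo dj 1).foldl
    (fun t d => t + (st.2.2.2 + pvWavy st.2.2.1 st.2.1 d) * 10 ^ (n - 1 - j).toNat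
      + pvG (n - 1 - j) d st.2.1) st.1
  (total, dj, st.2.1, st.2.2.2 + pvWavy st.2.2.1 st.2.1 dj)

-- up_to(x)
def pvUpToB (x : Int) : Int :=
  if x ≤ 0 then 0
  else
    let ds := (PySem.Int.toChars x).map (fun c => ((c.toNat : Int) - 48))
    let n : Int := PySem.List.len ds
    let total := (PySem.List.pyRange 1 n 1).foldl
      (fun t L => t + (PySem.List.pyRange 1 10 1).foldl (fun t2 a => t2 + pvG (L - 1) a 10) 0) 0
    let fin := (PySem.List.pyRange 0 n 1).foldl (pvScanStep n ds) (total, 10, 10, 0)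
    fin.1 + fin.2.2.2

def totalWaviness_alt (num1 : Int) (num2 : Int) : Int :=
  pvUpToB num2 - pvUpToB (num1 - 1)

-- ===== PRECONDITION & SPEC =====
def Spec_totalWaviness (num1 : Int) (num2 : Int) (out : Int) : Prop := out = totalWaviness_alt num1 num2
instance (num1 : Int) (num2 : Int) (out : Int) : Decidable (Spec_totalWaviness num1 num2 out) := by unfold Spec_totalWaviness; infer_instance

-- ===== CLAIM (what is proved, stated in full; the proofs are below) =====
def Claim_equal_totalWaviness : Prop := ∀ (num1 : Int) (num2 : Int), Dom_totalWaviness num1 num2 → Spec_totalWaviness num1 num2 (totalWaviness num1 num2)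

-- ===== LEMMAS AND PROOFS =====

-- ---- pure (memo-free) mirror of A's dp ----
mutual
def pvDpP (s : List Char) (fuel pos : Nat) (tight started : Bool) (prev1 prev2 : Int) :
    Int × Int :=
  match fuel with
  | 0 => if started then (1, 0) else (0, 0)
  | fuel' + 1 =>
    let limit : Int := if tight then pvDigitVal (PySem.List.pyGetD s (pos : Int) '0') else 9
    pvDpPLoop s fuel' pos tight started prev1 prev2 limit (PySem.List.pyRange 0 (limit + 1) 1) (0, 0)
termination_by (fuel, 1, 0)

def pvDpPLoop (s : List Char) (fuel' pos : Nat) (tight started : Bool)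
    (prev1 prev2 limit : Int) (ds : List Int) (acc : Int × Int) : Int × Int :=
  match ds with
  | [] => acc
  | d :: rest =>
    let nextTight := tight && (d == limit)
    if started = false then
      if d = 0 then
        let r := pvDpP s fuel' (pos + 1) nextTight false 10 10
        pvDpPLoop s fuel' pos tight started prev1 prev2 limit rest (acc.1 + r.1, acc.2 + r.2)
      else
        let r := pvDpP s fuel' (pos + 1) nextTight true d 10
        pvDpPLoop s fuel' pos tight started prev1 prev2 limit rest (acc.1 + r.1, acc.2 + r.2)
    else
      let add := pvAdd prev2 prev1 d
      let r := pvDpP s fuel' (pos + 1) nextTight true d prev1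
      pvDpPLoop s fuel' pos tight started prev1 prev2 limit rest
        (acc.1 + r.1, acc.2 + r.2 + add * r.1)
termination_by (fuel' + 1, 0, ds.length)
end

-- ---- memoization is sound: pvDpA computes pvDpP ----
def pvInv (s : List Char) (n : Nat) (memo : PvMemo) : Prop :=
  ∀ pos tight started p1 p2 v, memo.get? (pos, tight, started, p1, p2) = some v →
    pos ≤ n ∧ v = pvDpP s (n - pos) pos tight started p1 p2

theorem pvInv_empty (s : List Char) (n : Nat) : pvInv s n PySem.Dict.empty := by
  intro pos tight started p1 p2 v h
  rw [PySem.Dict.get?_empty] at h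
  exact absurd h (by simp)

theorem pvInv_insert (s : List Char) (n : Nat) (memo : PvMemo) (hm : pvInv s n memo)
    (pos : Nat) (tight started : Bool) (p1 p2 : Int) (r : Int × Int) (hpos : pos ≤ n)
    (hr : r = pvDpP s (n - pos) pos tight started p1 p2) :
    pvInv s n (memo.insert (pos, tight, started, p1, p2) r) := by
  intro pos' tight' started' p1' p2' v h
  rw [PySem.Dict.get?_insert] at h
  split_ifs at h with he
  · simp only [Prod.mk.injEq] at he
    obtain ⟨e1, e2, e3, e4, e5⟩ := he
    subst e1; subst e2; subst e3; subst e4; subst e5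
    injection h with h
    exact ⟨hpos, h ▸ hr⟩
  · exact hm _ _ _ _ _ _ h

theorem pvLoop_correct (s : List Char) (n : Nat) (fuel' : Nat)
    (IH : ∀ pos tight started p1 p2 memo, pvInv s n memo → pos + fuel' = n →
      (pvDpA s n fuel' pos tight started p1 p2 memo).1 = pvDpP s fuel' pos tight started p1 p2 ∧
      pvInv s n (pvDpA s n fuel' pos tight started p1 p2 memo).2) :
    ∀ ds pos tight started p1 p2 limit acc memo, pvInv s n memo → (pos + 1) + fuel' = n →
      (pvDpALoop s n fuel' pos tight started p1 p2 limit ds acc memo).1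
        = pvDpPLoop s fuel' pos tight started p1 p2 limit ds acc ∧
      pvInv s n (pvDpALoop s n fuel' pos tight started p1 p2 limit ds acc memo).2 := by
  intro ds
  induction ds with
  | nil => intro pos tight started p1 p2 limit acc memo hm hn; simp [pvDpALoop, pvDpPLoop, hm]
  | cons d rest ih =>
    intro pos tight started p1 p2 limit acc memo hm hn
    rw [pvDpALoop, pvDpPLoop]
    by_cases hst : started = false
    · by_cases hd : d = 0
      · subst hd
        obtain ⟨h1, h2⟩ := IH (pos + 1) (tight && ((0:Int) == limit)) false 10 10 memo hm (by omega)
        simp only [hst, if_true]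
        rw [h1]
        exact ih _ _ _ _ _ _ _ _ h2 hn
      · obtain ⟨h1, h2⟩ := IH (pos + 1) (tight && (d == limit)) true d 10 memo hm (by omega)
        simp only [hst, hd, if_false]
        rw [h1]
        exact ih _ _ _ _ _ _ _ _ h2 hn
    · obtain ⟨h1, h2⟩ := IH (pos + 1) (tight && (d == limit)) true d p1 memo hm (by omega)
      simp only [hst]
      rw [h1]
      exact ih _ _ _ _ _ _ _ _ h2 hn

theorem pvDpA_correct (s : List Char) (n : Nat) :
    ∀ fuel pos tight started p1 p2 memo, pvInv s n memo → pos + fuel = n →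
      (pvDpA s n fuel pos tight started p1 p2 memo).1 = pvDpP s fuel pos tight started p1 p2 ∧
      pvInv s n (pvDpA s n fuel pos tight started p1 p2 memo).2 := by
  intro fuel
  induction fuel with
  | zero =>
    intro pos tight started p1 p2 memo hm hn
    rw [pvDpA]
    cases hget : memo.get? (pos, tight, started, p1, p2) with
    | some v =>
      obtain ⟨hle, hv⟩ := hm _ _ _ _ _ _ hget
      have : n - pos = 0 := by omega
      simp only [this] at hv
      exact ⟨by simp [hv, pvDpP], by simpa using hm⟩
    | none =>
      refine ⟨by simp [pvDpP], ?_⟩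
      exact pvInv_insert s n memo hm pos tight started p1 p2 _ (by omega)
        (by simp [show n - pos = 0 by omega, pvDpP])
  | succ fuel' ihf =>
    intro pos tight started p1 p2 memo hm hn
    rw [pvDpA]
    cases hget : memo.get? (pos, tight, started, p1, p2) with
    | some v =>
      obtain ⟨hle, hv⟩ := hm _ _ _ _ _ _ hget
      have : n - pos = fuel' + 1 := by omega
      simp only [this] at hv
      exact ⟨by simp [hv], by simpa using hm⟩
    | none =>
      obtain ⟨hl1, hl2⟩ := pvLoop_correct s n fuel' ihf
        (PySem.List.pyRange 0 ((if tight = true then pvDigitVal (PySem.List.pyGetD s (pos : Int) '0') else 9) + 1) 1)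
        pos tight started p1 p2
        (if tight = true then pvDigitVal (PySem.List.pyGetD s (pos : Int) '0') else 9)
        (0, 0) memo hm (by omega)
      constructor
      · rw [pvDpP]; exact hl1
      · refine pvInv_insert s n _ hl2 pos tight started p1 p2 _ (by omega) ?_
        rw [hl1, show n - pos = fuel' + 1 by omega, pvDpP]

-- ---- digit facts about str(x) ----
theorem pvToDigitsCore_chars : ∀ fuel m acc, (∀ c ∈ acc, 48 ≤ c.toNat) →
    ∀ c ∈ Nat.toDigitsCore 10 fuel m acc, 48 ≤ c.toNat := by
  intro fuel
  induction fuel with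
  | zero => intro m acc hacc c hc; simp [Nat.toDigitsCore] at hc; exact hacc c hc
  | succ f ih =>
    intro m acc hacc c hc
    have hdig : ∀ k, k < 10 → 48 ≤ (Nat.digitChar k).toNat := by decide
    simp only [Nat.toDigitsCore] at hc
    by_cases h : m / 10 = 0
    · simp [h] at hc
      rcases hc with rfl | hc
      · exact hdig _ (Nat.mod_lt _ (by norm_num))
      · exact hacc c hc
    · simp only [h, if_false] at hc
      refine ih _ _ ?_ c hc
      intro c' hc'
      rcases List.mem_cons.mp hc' with rfl | hc'
      · exact hdig _ (Nat.mod_lt _ (by norm_num))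
      · exact hacc c' hc'

theorem pvToDigitsCore_head : ∀ fuel m acc, 1 ≤ m → m < 10 ^ fuel →
    ∃ c t, Nat.toDigitsCore 10 fuel m acc = c :: t ∧ 49 ≤ c.toNat ∧ c.toNat ≤ 57 := by
  intro fuel
  induction fuel with
  | zero => intro m acc h1 h2; omega
  | succ f ih =>
    intro m acc h1 h2
    have hdig : ∀ k, 1 ≤ k → k < 10 → 49 ≤ (Nat.digitChar k).toNat ∧ (Nat.digitChar k).toNat ≤ 57 := by decide
    simp only [Nat.toDigitsCore]
    by_cases h : m / 10 = 0
    · have hm : m < 10 := by omega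
      have := hdig (m % 10) (by omega) (by omega)
      exact ⟨_, acc, by simp only [h, if_true], this.1, this.2⟩
    · simp only [h, if_false]
      exact ih (m / 10) _ (by omega)
        (Nat.div_lt_of_lt_mul (by rw [← pow_succ']; omega))

theorem pvToChars_pos (x : Int) (hx : 1 ≤ x) :
    ∃ c t, PySem.Int.toChars x = c :: t ∧ 49 ≤ c.toNat ∧
      (∀ c' ∈ PySem.Int.toChars x, 48 ≤ c'.toNat) := by
  have hx' : ¬ x < 0 := by omega
  have hmlt : x.toNat < 10 ^ (x.toNat + 1) := by
    calc x.toNat < 2 ^ x.toNat := Nat.lt_two_pow_self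
    _ ≤ 10 ^ x.toNat := Nat.pow_le_pow_left (by norm_num) _
    _ < 10 ^ (x.toNat + 1) := Nat.pow_lt_pow_succ (by norm_num)
  have h1 : 1 ≤ x.toNat := by omega
  unfold PySem.Int.toChars
  simp only [hx', if_false]
  unfold Nat.toDigits
  obtain ⟨c, t, heq, hc, _⟩ := pvToDigitsCore_head (x.toNat + 1) x.toNat [] h1 hmlt
  exact ⟨c, t, heq, hc, fun c' hc' => pvToDigitsCore_chars _ _ _ (by simp) c' hc'⟩

-- ---- closed-form recurrences ----
theorem pvAdd_eq_wavy (p2 p1 d : Int) : pvAdd p2 p1 d = pvWavy p2 p1 d := by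
  unfold pvAdd pvWavy; split_ifs with h1 h2 h3 h3 <;> tauto

theorem pvRange10 : PySem.List.pyRange 0 10 1 = [0,1,2,3,4,5,6,7,8,9] := by decide

theorem pvW1_expand (p2 p1 : Int) : pvW1 p2 p1 =
    pvWavy p2 p1 0 + pvWavy p2 p1 1 + pvWavy p2 p1 2 + pvWavy p2 p1 3 + pvWavy p2 p1 4 +
    pvWavy p2 p1 5 + pvWavy p2 p1 6 + pvWavy p2 p1 7 + pvWavy p2 p1 8 + pvWavy p2 p1 9 := by
  simp [pvW1, pvRange10]; ring

theorem pvW2_expand (p1 : Int) : pvW2 p1 =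
    pvW1 p1 0 + pvW1 p1 1 + pvW1 p1 2 + pvW1 p1 3 + pvW1 p1 4 +
    pvW1 p1 5 + pvW1 p1 6 + pvW1 p1 7 + pvW1 p1 8 + pvW1 p1 9 := by
  simp [pvW2, pvRange10]; ring

theorem pvW2_lit : pvW2 0 = 45 ∧ pvW2 1 = 53 ∧ pvW2 2 = 59 ∧ pvW2 3 = 63 ∧ pvW2 4 = 65 ∧
    pvW2 5 = 65 ∧ pvW2 6 = 63 ∧ pvW2 7 = 59 ∧ pvW2 8 = 53 ∧ pvW2 9 = 45 := by decide

theorem pvG_nat (m : Nat) (p1 p2 : Int) : pvG (m : Int) p1 p2 =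
    (if 1 ≤ m then pvW1 p2 p1 * 10 ^ (m - 1) else 0) +
    (if 2 ≤ m then pvW2 p1 * 10 ^ (m - 2) else 0) +
    (if 3 ≤ m then ((m : Int) - 2) * 570 * 10 ^ (m - 3) else 0) := by
  have e1 : ((m : Int) - 1).toNat = m - 1 := by omega
  have e2 : ((m : Int) - 2).toNat = m - 2 := by omega
  have e3 : ((m : Int) - 3).toNat = m - 3 := by omega
  rw [pvG, e1, e2, e3]
  simp only [show ((1:Int) ≤ (m:Int)) ↔ (1 ≤ m) by omega,
    show ((2:Int) ≤ (m:Int)) ↔ (2 ≤ m) by omega,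
    show ((3:Int) ≤ (m:Int)) ↔ (3 ≤ m) by omega]

theorem pvG_rec (fuel : Nat) (p1 p2 : Int) :
    ((PySem.List.pyRange 0 10 1).map
        (fun d => pvG (fuel : Int) d p1 + pvWavy p2 p1 d * 10 ^ fuel)).sum
      = pvG ((fuel : Int) + 1) p1 p2 := by
  obtain ⟨w0,w1,w2,w3,w4,w5,w6,w7,w8,w9⟩ := pvW2_lit
  have hcast : ((fuel : Int) + 1) = ((fuel + 1 : Nat) : Int) := by push_cast; ring
  simp only [pvRange10, List.map_cons, List.map_nil, List.sum_cons, List.sum_nil, hcast]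
  rw [pvG_nat, pvG_nat, pvG_nat, pvG_nat, pvG_nat, pvG_nat, pvG_nat, pvG_nat, pvG_nat,
    pvG_nat, pvG_nat]
  match fuel with
  | 0 => norm_num [pvW1_expand p2 p1]; ring
  | 1 =>
    norm_num [pvW2_expand p1]
    rw [pvW1_expand p2 p1]; ring
  | 2 =>
    norm_num []
    rw [pvW2_expand p1, pvW1_expand p2 p1, w0,w1,w2,w3,w4,w5,w6,w7,w8,w9]; ring
  | (k+3) =>
    norm_num [Nat.succ_sub_one]
    rw [pvW2_expand p1, pvW1_expand p2 p1, w0,w1,w2,w3,w4,w5,w6,w7,w8,w9]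
    have s2 : k + 3 - 2 = k + 1 := by omega
    have s5 : k + 4 - 2 = k + 2 := by omega
    have s6 : k + 4 - 3 = k + 1 := by omega
    simp only [s2, s5, s6]
    ring_nf

-- ---- loop shapes of the pure dp ----
theorem pvLoopStarted (s : List Char) (fuel pos : Nat) (tight : Bool) (p1 p2 limit : Int) :
    ∀ ds tc tw, pvDpPLoop s fuel pos tight true p1 p2 limit ds (tc, tw) =
      (tc + (ds.map fun d => (pvDpP s fuel (pos+1) (tight && (d == limit)) true d p1).1).sum,
       tw + (ds.map fun d => (pvDpP s fuel (pos+1) (tight && (d == limit)) true d p1).2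
         + pvAdd p2 p1 d * (pvDpP s fuel (pos+1) (tight && (d == limit)) true d p1).1).sum) := by
  intro ds
  induction ds with
  | nil => intro tc tw; simp [pvDpPLoop]
  | cons d rest ih =>
    intro tc tw
    rw [pvDpPLoop]
    simp only [Bool.true_eq_false, if_false, List.map_cons, List.sum_cons]
    rw [ih]
    simp only [Prod.mk.injEq]
    constructor <;> ring

theorem pvLoopUnstartedPos (s : List Char) (fuel pos : Nat) (tight : Bool) (p1 p2 limit : Int) :
    ∀ ds, (∀ d ∈ ds, d ≠ 0 ∧ (tight && (d == limit)) = false) → ∀ tc tw,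
      pvDpPLoop s fuel pos tight false p1 p2 limit ds (tc, tw) =
      (tc + (ds.map fun d => (pvDpP s fuel (pos+1) false true d 10).1).sum,
       tw + (ds.map fun d => (pvDpP s fuel (pos+1) false true d 10).2).sum) := by
  intro ds
  induction ds with
  | nil => intro h tc tw; simp [pvDpPLoop]
  | cons d rest ih =>
    intro h tc tw
    obtain ⟨hd0, hnt⟩ := h d (by simp)
    rw [pvDpPLoop]
    simp only [hd0, hnt, if_false, reduceIte, List.map_cons, List.sum_cons]
    rw [ih (fun d hd => h d (by simp [hd]))]
    simp only [Prod.mk.injEq]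
    constructor <;> ring

-- free started suffix: count 10^fuel, wavy pvG fuel p1 p2
theorem pvFS (s : List Char) : ∀ fuel pos p1 p2,
    pvDpP s fuel pos false true p1 p2 = ((10 : Int) ^ fuel, pvG (fuel : Int) p1 p2) := by
  intro fuel
  induction fuel with
  | zero => intro pos p1 p2; simp [pvDpP, pvG]
  | succ fuel' ih =>
    intro pos p1 p2
    rw [pvDpP]
    simp only [Bool.false_eq_true, if_false]
    rw [show (9 : Int) + 1 = 10 by norm_num]
    rw [pvLoopStarted]
    simp only [ih, pvAdd_eq_wavy, Bool.false_and]
    congr 1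
    · rw [show ((PySem.List.pyRange 0 10 1).map fun d =>
          ((10:Int) ^ fuel', pvG (fuel' : Int) d p1).1)
        = ((PySem.List.pyRange 0 10 1).map fun _ => (10:Int) ^ fuel') from rfl]
      rw [PySem.List.sum_map_const_int]
      simp [pvRange10, pow_succ]; ring
    · rw [show ((PySem.List.pyRange 0 10 1).map fun d =>
          ((10:Int) ^ fuel', pvG (fuel' : Int) d p1).2 + pvWavy p2 p1 d * ((10:Int) ^ fuel', pvG (fuel' : Int) d p1).1)
        = ((PySem.List.pyRange 0 10 1).map fun d => pvG (fuel' : Int) d p1 + pvWavy p2 p1 d * 10 ^ fuel') from rfl]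
      rw [pvG_rec]
      push_cast; ring_nf

-- free unstarted: count 10^fuel - 1, wavy pvU fuel
def pvU : Nat → Int
  | 0 => 0
  | m + 1 => pvU m + ((PySem.List.pyRange 1 10 1).map (fun a => pvG (m : Int) a 10)).sum

theorem pvFU (s : List Char) : ∀ fuel pos,
    pvDpP s fuel pos false false 10 10 = ((10 : Int) ^ fuel - 1, pvU fuel) := by
  intro fuel
  induction fuel with
  | zero => intro pos; simp [pvDpP, pvU]
  | succ fuel' ih =>
    intro pos
    rw [pvDpP]
    simp only [Bool.false_eq_true, if_false]
    rw [show (9 : Int) + 1 = 10 by norm_num]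
    rw [show PySem.List.pyRange 0 10 1 = 0 :: PySem.List.pyRange 1 10 1 from by decide]
    rw [pvDpPLoop]
    simp only [Bool.false_and, reduceIte]
    rw [ih]
    rw [pvLoopUnstartedPos s fuel' pos false 10 10 9 _
      (by intro d hd; rw [PySem.List.mem_pyRange_one] at hd; exact ⟨by omega, by simp⟩)]
    simp only [pvFS s fuel']
    rw [show ((PySem.List.pyRange 1 10 1).map fun d =>
        ((10:Int) ^ fuel', pvG (fuel' : Int) d 10).1)
      = ((PySem.List.pyRange 1 10 1).map fun _ => (10:Int) ^ fuel') from rfl]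
    rw [PySem.List.sum_map_const_int]
    rw [show ((PySem.List.pyRange 1 10 1).map fun d =>
        ((10:Int) ^ fuel', pvG (fuel' : Int) d 10).2)
      = ((PySem.List.pyRange 1 10 1).map fun d => pvG (fuel' : Int) d 10) from rfl]
    simp only [Prod.mk.injEq]
    constructor
    · rw [PySem.List.length_pyRange_one]
      norm_num [pow_succ]; ring
    · rw [pvU]; ring_nf

-- B's shorter-lengths loop computes pvU
theorem pvTotal0 (k : Nat) :
    (PySem.List.pyRange 1 ((k : Int) + 1) 1).foldl
      (fun t L => t + (PySem.List.pyRange 1 10 1).foldl (fun t2 a => t2 + pvG (L - 1) a 10) 0) 0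
    = pvU k := by
  induction k with
  | zero =>
    rw [show ((0 : Nat) : Int) + 1 = 1 by norm_num,
      PySem.List.pyRange_one_eq_nil (le_refl (1 : Int))]
    simp [pvU]
  | succ k ih =>
    rw [show ((k + 1 : Nat) : Int) + 1 = ((k : Int) + 1) + 1 by push_cast; ring,
      PySem.List.pyRange_one_succ_right (a := 1) (b := (k : Int) + 1) (by omega), List.foldl_append]
    simp only [List.foldl_cons, List.foldl_nil]
    rw [ih, pvU]
    rw [PySem.List.foldl_add ((PySem.List.pyRange 1 10 1)) (fun a => pvG ((k:Int) + 1 - 1) a 10) 0]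
    simp only [show ((k:Int) + 1 - 1) = (k:Int) by ring]
    ring

-- tight scan bridge
theorem pvWavy10 (b c : Int) : pvWavy 10 b c = 0 := by simp [pvWavy]

theorem pvFoldlAdd2 (A B : Int → Int) : ∀ (l : List Int) (t : Int),
    l.foldl (fun t d => t + A d + B d) t = t + (l.map (fun d => A d + B d)).sum := by
  intro l
  induction l with
  | nil => intro t; simp
  | cons d rest ih => intro t; simp only [List.foldl_cons, List.map_cons, List.sum_cons, ih]; ring

theorem pvDpPLoop_append (s : List Char) (fuel pos : Nat) (tight started : Bool)
    (p1 p2 limit : Int) : ∀ l1 l2 acc,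
    pvDpPLoop s fuel pos tight started p1 p2 limit (l1 ++ l2) acc
      = pvDpPLoop s fuel pos tight started p1 p2 limit l2
          (pvDpPLoop s fuel pos tight started p1 p2 limit l1 acc) := by
  cases started with
  | false =>
    intro l1
    induction l1 with
    | nil => intro l2 acc; rw [List.nil_append, pvDpPLoop]
    | cons d rest ih =>
      intro l2 acc
      rw [List.cons_append, pvDpPLoop, pvDpPLoop]
      by_cases hd : d = 0
      · simp only [hd, if_true]; rw [ih]
      · simp only [hd, if_true, if_false]; rw [ih]
  | true =>
    intro l1
    induction l1 with
    | nil => intro l2 acc; rw [List.nil_append, pvDpPLoop]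
    | cons d rest ih =>
      intro l2 acc
      rw [List.cons_append, pvDpPLoop, pvDpPLoop]
      simp only [Bool.true_eq_false, if_false]
      rw [ih]

theorem pvGetDigit (s : List Char) (j : Nat) (hj : j < s.length) :
    PySem.List.pyGetD (s.map (fun c => ((c.toNat : Int) - 48))) (j : Int) 0
      = pvDigitVal (PySem.List.pyGetD s (j : Int) '0') := by
  rw [PySem.List.pyGetD_natCast, PySem.List.pyGetD_natCast,
    List.getD_eq_getElem _ _ (by simpa using hj), List.getD_eq_getElem _ _ hj,
    List.getElem_map]
  rfl

theorem pvScan (s : List Char) (ds : List Int) (n : Nat)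
    (hds : ds = s.map (fun c => ((c.toNat : Int) - 48)))
    (hn : n = s.length) (hd0 : ∀ c ∈ s, 48 ≤ c.toNat) :
    ∀ fuel j, 1 ≤ j → j + fuel = n → ∀ total p1 p2 wfix,
      (let r := (PySem.List.pyRange (j : Int) (n : Int) 1).foldl (pvScanStep (n : Int) ds)
        (total, p1, p2, wfix);
       r.1 + r.2.2.2)
      = total + (pvDpP s fuel j true true p1 p2).2
        + wfix * (pvDpP s fuel j true true p1 p2).1 := by
  intro fuel
  induction fuel with
  | zero =>
    intro j hj1 hjn total p1 p2 wfix
    rw [PySem.List.pyRange_one_eq_nil (by omega)]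
    simp [pvDpP]
  | succ fuel' ih =>
    intro j hj1 hjn total p1 p2 wfix
    have hjlt : j < n := by omega
    have hjs : j < s.length := by omega
    have hdj : PySem.List.pyGetD ds (j : Int) 0 = pvDigitVal (PySem.List.pyGetD s (j : Int) '0') :=
      hds ▸ pvGetDigit s j hjs
    have hdjge : (0 : Int) ≤ pvDigitVal (PySem.List.pyGetD s (j : Int) '0') := by
      rw [PySem.List.pyGetD_natCast, List.getD_eq_getElem _ _ hjs]
      have := hd0 (s[j]'hjs) (List.getElem_mem hjs)
      unfold pvDigitVal
      omega
    -- peel step j on the B side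
    rw [PySem.List.pyRange_one_cons (by omega : (j : Int) < (n : Int)), List.foldl_cons,
      pvScanStep]
    simp only [if_neg (by omega : ¬ (j : Int) = 0), hdj]
    rw [pvFoldlAdd2]
    rw [show ((j : Int) + 1) = ((j + 1 : Nat) : Int) by push_cast; ring]
    rw [ih (j + 1) (by omega) (by omega)]
    -- unfold the dp node at j
    rw [pvDpP]
    simp only [reduceIte]
    rw [show PySem.List.pyRange 0 (pvDigitVal (PySem.List.pyGetD s ((j : Nat) : Int) '0') + 1) 1
        = PySem.List.pyRange 0 (pvDigitVal (PySem.List.pyGetD s ((j : Nat) : Int) '0')) 1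
          ++ [pvDigitVal (PySem.List.pyGetD s ((j : Nat) : Int) '0')] from
      PySem.List.pyRange_one_succ_right (by omega)]
    rw [pvLoopStarted]
    rw [List.map_append, List.map_append, List.sum_append, List.sum_append]
    -- the tight branch d = limit
    have hbeq : ((pvDigitVal (PySem.List.pyGetD s ((j : Nat) : Int) '0'))
        == (pvDigitVal (PySem.List.pyGetD s ((j : Nat) : Int) '0'))) = true := by simp
    simp only [List.map_cons, List.map_nil, List.sum_cons, List.sum_nil, hbeq, Bool.and_true]
    -- the free branches d < limit
    have hfree1 : ((PySem.List.pyRange 0 (pvDigitVal (PySem.List.pyGetD s ((j : Nat) : Int) '0')) 1).map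
        (fun d => (pvDpP s fuel' (j + 1)
          (true && (d == pvDigitVal (PySem.List.pyGetD s ((j : Nat) : Int) '0'))) true d p1).1)).sum
        = ((PySem.List.pyRange 0 (pvDigitVal (PySem.List.pyGetD s ((j : Nat) : Int) '0')) 1).map
            (fun _ => (10 : Int) ^ fuel')).sum := by
      apply congrArg
      apply List.map_congr_left
      intro d hd
      rw [PySem.List.mem_pyRange_one] at hd
      rw [show (true && (d == pvDigitVal (PySem.List.pyGetD s ((j : Nat) : Int) '0'))) = false from
        by simp only [Bool.true_and, beq_eq_false_iff_ne, ne_eq]; omega, pvFS]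
    have hfree2 : ((PySem.List.pyRange 0 (pvDigitVal (PySem.List.pyGetD s ((j : Nat) : Int) '0')) 1).map
        (fun d => (pvDpP s fuel' (j + 1)
            (true && (d == pvDigitVal (PySem.List.pyGetD s ((j : Nat) : Int) '0'))) true d p1).2
          + pvAdd p2 p1 d * (pvDpP s fuel' (j + 1)
            (true && (d == pvDigitVal (PySem.List.pyGetD s ((j : Nat) : Int) '0'))) true d p1).1)).sum
        = ((PySem.List.pyRange 0 (pvDigitVal (PySem.List.pyGetD s ((j : Nat) : Int) '0')) 1).map
            (fun d => pvG (fuel' : Int) d p1 + pvWavy p2 p1 d * (10 : Int) ^ fuel')).sum := by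
      apply congrArg
      apply List.map_congr_left
      intro d hd
      rw [PySem.List.mem_pyRange_one] at hd
      rw [show (true && (d == pvDigitVal (PySem.List.pyGetD s ((j : Nat) : Int) '0'))) = false from
        by simp only [Bool.true_and, beq_eq_false_iff_ne, ne_eq]; omega, pvFS, pvAdd_eq_wavy]
    rw [hfree1, hfree2]
    -- align B's closed forms with A's
    have hsum : ((PySem.List.pyRange 0 (pvDigitVal (PySem.List.pyGetD s ((j : Nat) : Int) '0')) 1).map
        (fun d => (wfix + pvWavy p2 p1 d) * 10 ^ ((n : Int) - 1 - (j : Int)).toNat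
          + pvG ((n : Int) - 1 - (j : Int)) d p1)).sum
        = ((PySem.List.pyRange 0 (pvDigitVal (PySem.List.pyGetD s ((j : Nat) : Int) '0')) 1).map
            (fun d => pvG (fuel' : Int) d p1 + pvWavy p2 p1 d * (10 : Int) ^ fuel')).sum
          + wfix * ((PySem.List.pyRange 0 (pvDigitVal (PySem.List.pyGetD s ((j : Nat) : Int) '0')) 1).map
            (fun _ => (10 : Int) ^ fuel')).sum := by
      rw [show ((n : Int) - 1 - (j : Int)).toNat = fuel' by omega,
        show ((n : Int) - 1 - (j : Int)) = (fuel' : Int) by omega]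
      induction (PySem.List.pyRange 0 (pvDigitVal (PySem.List.pyGetD s ((j : Nat) : Int) '0')) 1) with
      | nil => simp
      | cons e rest ihr =>
        simp only [List.map_cons, List.sum_cons]
        rw [ihr]
        ring
    rw [hsum, pvAdd_eq_wavy]
    ring

-- assembly per boundary
theorem pvMain (c : Char) (t : List Char)
    (hc : 49 ≤ c.toNat) (hall : ∀ ch ∈ (c :: t), 48 ≤ ch.toNat) :
    (pvDpP (c :: t) (c :: t).length 0 true false 10 10).2
      = (let ds := (c :: t).map (fun ch => ((ch.toNat : Int) - 48));
         let n : Int := PySem.List.len ds;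
         let total := (PySem.List.pyRange 1 n 1).foldl
           (fun tt L => tt + (PySem.List.pyRange 1 10 1).foldl
             (fun t2 a => t2 + pvG (L - 1) a 10) 0) 0;
         let fin := (PySem.List.pyRange 0 n 1).foldl (pvScanStep n ds) (total, 10, 10, 0);
         fin.1 + fin.2.2.2) := by
  have hd0c : PySem.List.pyGetD (c :: t) ((0 : Nat) : Int) '0' = c := by
    rw [Nat.cast_zero, PySem.List.pyGetD_zero_cons]
  have hcge : 49 ≤ c.toNat := hc
  have hd0def : pvDigitVal (PySem.List.pyGetD (c :: t) ((0 : Nat) : Int) '0')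
      = (c.toNat : Int) - 48 := by rw [hd0c]; rfl
  have hd01 : (1 : Int) ≤ (c.toNat : Int) - 48 := by omega
  -- A side: unfold the root dp node
  rw [show (c :: t).length = t.length + 1 from rfl, pvDpP]
  simp only [if_true, hd0def]
  rw [show PySem.List.pyRange 0 (((c.toNat : Int) - 48) + 1) 1
      = 0 :: (PySem.List.pyRange 1 ((c.toNat : Int) - 48) 1 ++ [(c.toNat : Int) - 48]) from by
    rw [PySem.List.pyRange_one_cons (by omega), show (0:Int) + 1 = 1 by ring,
      PySem.List.pyRange_one_succ_right (by omega)]]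
  rw [pvDpPLoop]
  simp only [reduceIte, show ((0:Int) == ((c.toNat : Int) - 48)) = false from by
    simp only [beq_eq_false_iff_ne, ne_eq]; omega, Bool.and_false, pvFU]
  rw [pvDpPLoop_append]
  rw [pvLoopUnstartedPos (c :: t) t.length 0 true 10 10 ((c.toNat : Int) - 48)
    (PySem.List.pyRange 1 ((c.toNat : Int) - 48) 1)
    (by intro d hd; rw [PySem.List.mem_pyRange_one] at hd;
        exact ⟨by omega, by simp only [Bool.true_and, beq_eq_false_iff_ne, ne_eq]; omega⟩)]
  simp only [pvFS (c :: t) t.length]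
  rw [show ((PySem.List.pyRange 1 ((c.toNat : Int) - 48) 1).map
      (fun d => (((10:Int) ^ t.length, pvG (t.length : Int) d 10)).1))
    = ((PySem.List.pyRange 1 ((c.toNat : Int) - 48) 1).map (fun _ => (10:Int) ^ t.length)) from rfl]
  rw [show ((PySem.List.pyRange 1 ((c.toNat : Int) - 48) 1).map
      (fun d => (((10:Int) ^ t.length, pvG (t.length : Int) d 10)).2))
    = ((PySem.List.pyRange 1 ((c.toNat : Int) - 48) 1).map (fun d => pvG (t.length : Int) d 10)) from rfl]
  rw [pvDpPLoop]
  simp only [reduceIte, if_neg (show ¬ ((c.toNat : Int) - 48) = 0 from by omega),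
    beq_self_eq_true, Bool.and_true]
  rw [pvDpPLoop]
  -- B side: lengths and the shorter-lengths total
  simp only [PySem.List.len_eq, List.length_map, List.length_cons]
  rw [show ((t.length + 1 : Nat) : Int) = ((t.length : Nat) : Int) + 1 from by push_cast; ring]
  rw [pvTotal0 t.length]
  -- B side: peel scan step j = 0
  rw [show PySem.List.pyRange 0 ((t.length : Int) + 1) 1
      = 0 :: PySem.List.pyRange 1 ((t.length : Int) + 1) 1 from by
    rw [PySem.List.pyRange_one_cons (by omega), show (0:Int) + 1 = 1 by ring]]
  rw [List.foldl_cons, pvScanStep]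
  have hdj0 : PySem.List.pyGetD ((c :: t).map (fun ch => ((ch.toNat : Int) - 48))) (0 : Int) 0
      = (c.toNat : Int) - 48 := by
    have h := pvGetDigit (c :: t) 0 (by simp)
    rw [hd0def] at h
    simp only [Nat.cast_zero] at h
    exact h
  simp only [reduceIte, hdj0, pvWavy10]
  rw [pvFoldlAdd2]
  rw [show ((PySem.List.pyRange 1 ((c.toNat : Int) - 48) 1).map
      (fun d => ((0 : Int) + 0) * 10 ^ (((t.length : Int) + 1) - 1 - 0).toNat
        + pvG (((t.length : Int) + 1) - 1 - 0) d 10)).sum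
    = ((PySem.List.pyRange 1 ((c.toNat : Int) - 48) 1).map
        (fun d => pvG (t.length : Int) d 10)).sum from by
    apply congrArg
    apply List.map_congr_left
    intro d _
    rw [show (((t.length : Int) + 1) - 1 - 0) = (t.length : Int) from by ring]
    ring]
  -- B side: the remaining scan via pvScan
  have hscan := pvScan (c :: t) ((c :: t).map (fun ch => ((ch.toNat : Int) - 48)))
    (t.length + 1) rfl (by simp) hall t.length 1 (by omega) (by omega)
    (pvU t.length + ((PySem.List.pyRange 1 ((c.toNat : Int) - 48) 1).map
      (fun d => pvG (t.length : Int) d 10)).sum)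
    ((c.toNat : Int) - 48) 10 (0 + 0)
  simp only [Nat.cast_one, Nat.cast_add] at hscan
  rw [hscan]
  norm_num
theorem pvUpTo_eq (x : Int) : pvUpToA x = pvUpToB x := by
  by_cases hx : x ≤ 0
  · simp [pvUpToA, pvUpToB, hx]
  · have hx1 : (1 : Int) ≤ x := by omega
    obtain ⟨c, t, hs, hc49, hall⟩ := pvToChars_pos x hx1
    rw [pvUpToA, pvUpToB]
    simp only [if_neg hx]
    rw [(pvDpA_correct (PySem.Int.toChars x) (PySem.Int.toChars x).length
      (PySem.Int.toChars x).length 0 true false 10 10 PySem.Dict.empty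
      (pvInv_empty _ _) (by omega)).1]
    rw [hs]
    exact pvMain c t hc49 (hs ▸ hall)
-- ===== VERDICT (by name: the statement is the Claim_ definition above) =====
theorem totalWaviness_spec : Claim_equal_totalWaviness := by
  intro num1 num2 _
  show totalWaviness num1 num2 = totalWaviness_alt num1 num2
  unfold totalWaviness totalWaviness_alt
  rw [pvUpTo_eq, pvUpTo_eq]
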